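-- pv_equiv track=rewrite | github.com/YuanGongND/efficient-voice-antispoof | model_AFN/src/attention_neuro/simple_attention_network.py | _update_size
-- ===== SOURCE A (Python) =====
-- def _update_size(size, order=1):
--     first = 0
--     for i in range(3, order + 2):
--         first += (2 ** i)
--
--     second = 0
--     for i in range(4, order + 3):
--         second += (2 ** i)
--     return size[0] - first, size[1] - second
-- ===== SOURCE B (Python) =====
-- def _update_size(size, order=1):
--     # closed-form geometric sums instead of the two loops:
--     # sum_{i=3}^{order+1} 2^i = 2^(order+2) - 8 (empty when order < 2), similarly for the second.
--     if order >= 2: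
--         first = (1 << (order + 2)) - 8
--         second = (1 << (order + 3)) - 16
--     else:
--         first = second = 0
--     return size[0] - first, size[1] - second
-- ===== Notes on version B (the rewrite author's own statement) =====
-- stated objective: faster
-- what changed: replaces the two O(order) accumulation loops over powers of two by the closed-form geometric sums 2^(order+2)-8 and 2^(order+3)-16 (0 when order < 2)
import Mathlib
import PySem

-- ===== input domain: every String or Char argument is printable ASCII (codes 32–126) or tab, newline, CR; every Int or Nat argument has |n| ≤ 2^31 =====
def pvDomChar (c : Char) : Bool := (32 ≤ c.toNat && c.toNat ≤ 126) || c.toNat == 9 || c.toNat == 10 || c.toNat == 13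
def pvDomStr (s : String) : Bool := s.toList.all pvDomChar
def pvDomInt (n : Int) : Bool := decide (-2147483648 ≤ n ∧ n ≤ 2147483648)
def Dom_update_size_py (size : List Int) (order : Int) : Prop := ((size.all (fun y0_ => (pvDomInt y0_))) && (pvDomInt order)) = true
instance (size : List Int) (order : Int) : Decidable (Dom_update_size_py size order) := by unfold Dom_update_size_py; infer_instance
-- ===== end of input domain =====

-- B replaces A's two O(order) power-of-two accumulation loops by closed-form geometric sums (O(1)).


-- ===== PORT A =====
def update_size_py (size : List Int) (order : Int) : List Int :=
  let first := (PySem.List.pyRange 3 (order + 2) 1).foldl (fun acc i => acc + 2 ^ i.toNat) 0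
  let second := (PySem.List.pyRange 4 (order + 3) 1).foldl (fun acc i => acc + 2 ^ i.toNat) 0
  match PySem.List.pyGet? size 0, PySem.List.pyGet? size 1 with
  | some s0, some s1 => [s0 - first, s1 - second]
  | _, _ => []   -- unreachable under Pre_ (Python raises IndexError here)

-- ===== PORT B =====
def update_size_py_alt (size : List Int) (order : Int) : List Int :=
  let first : Int := if 2 ≤ order then 2 ^ (order + 2).toNat - 8 else 0
  let second : Int := if 2 ≤ order then 2 ^ (order + 3).toNat - 16 else 0
  match size with
  | s0 :: s1 :: _ => [s0 - first, s1 - second]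
  | _ => []   -- unreachable under Pre_ (Python raises IndexError here)

-- ===== PRECONDITION & SPEC =====
-- Pre_ excludes exactly the inputs where Python A raises IndexError: size needs at least 2 elements.
def Pre_update_size_py (size : List Int) (order : Int) : Prop := 2 ≤ size.length
instance (size : List Int) (order : Int) : Decidable (Pre_update_size_py size order) := by unfold Pre_update_size_py; infer_instance
def pvWitness_update_size_py : List Int × Int := ([5, 9], 3)

def Spec_update_size_py (size : List Int) (order : Int) (out : List Int) : Prop := out = update_size_py_alt size order
instance (size : List Int) (order : Int) (out : List Int) : Decidable (Spec_update_size_py size order out) := by unfold Spec_update_size_py; infer_instance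

-- ===== CLAIM (what is proved, stated in full; the proofs are below) =====
def Claim_equal_update_size_py : Prop := ∀ (size : List Int) (order : Int), Dom_update_size_py size order → Pre_update_size_py size order → Spec_update_size_py size order (update_size_py size order)

-- ===== LEMMAS AND PROOFS =====

-- geometric sum over a Python range: sum_{i=a}^{a+n-1} 2^i = 2^(a+n) - 2^a  (for 0 ≤ a)
theorem geo_sum (n : Nat) (a : Int) (ha : 0 ≤ a) (c : Int) :
    (PySem.List.pyRange a (a + n) 1).foldl (fun acc i => acc + 2 ^ i.toNat) c
      = c + 2 ^ (a + n).toNat - 2 ^ a.toNat := by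
  induction n generalizing c with
  | zero => simp [PySem.List.pyRange_one_eq_nil (le_refl a)]
  | succ n ih =>
    have h1 : a ≤ a + n := le_add_of_nonneg_right (by exact_mod_cast Nat.zero_le n)
    have h2 : (a + (↑(n + 1) : Int)) = (a + n) + 1 := by push_cast; ring
    rw [h2, PySem.List.pyRange_one_succ_right h1, List.foldl_append, ih]
    have h3 : ((a + n) + 1).toNat = (a + n).toNat + 1 := by omega
    simp only [List.foldl_cons, List.foldl_nil, h3, pow_succ]
    ring

theorem first_eq (order : Int) :
    (PySem.List.pyRange 3 (order + 2) 1).foldl (fun acc i => acc + 2 ^ i.toNat) 0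
      = (if 2 ≤ order then 2 ^ (order + 2).toNat - 8 else (0 : Int)) := by
  by_cases h : 2 ≤ order
  · have hn : order + 2 = 3 + ((order - 1).toNat : Int) := by omega
    rw [hn, geo_sum (order - 1).toNat 3 (by norm_num) 0, if_pos h]
    have : (3 + ((order - 1).toNat : Int)).toNat = (order + 2).toNat := by omega
    rw [this]
    norm_num [Int.toNat]
  · rw [PySem.List.pyRange_one_eq_nil (a := 3) (b := order + 2) (by omega), if_neg h]
    simp
theorem second_eq (order : Int) :
    (PySem.List.pyRange 4 (order + 3) 1).foldl (fun acc i => acc + 2 ^ i.toNat) 0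
      = (if 2 ≤ order then 2 ^ (order + 3).toNat - 16 else (0 : Int)) := by
  by_cases h : 2 ≤ order
  · have hn : order + 3 = 4 + ((order - 1).toNat : Int) := by omega
    rw [hn, geo_sum (order - 1).toNat 4 (by norm_num) 0, if_pos h]
    have : (4 + ((order - 1).toNat : Int)).toNat = (order + 3).toNat := by omega
    rw [this]
    norm_num [Int.toNat]
  · rw [PySem.List.pyRange_one_eq_nil (a := 4) (b := order + 3) (by omega), if_neg h]
    simp

-- ===== VERDICT (by name: the statement is the Claim_ definition above) =====
theorem update_size_py_spec : Claim_equal_update_size_py := by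
  intro size order _ hpre
  match size, hpre with
  | s0 :: s1 :: rest, _ =>
    unfold Spec_update_size_py update_size_py update_size_py_alt
    rw [first_eq, second_eq]
    have h0 : (0:Int) ≤ (rest.length : Int) + 1 := by positivity
    simp [PySem.List.pyGet?, PySem.List.pyIdx?, h0]
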